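-- pv_equiv track=rewrite | github.com/vm6502q/pyqrack-examples | rcs/rcs_nn_tn.py | factor_width
-- ===== SOURCE A (Python) =====
-- import math
--
-- def factor_width(width):
--     col_len = math.floor(math.sqrt(width))
--     while ((width // col_len) * col_len) != width:
--         col_len -= 1
--     row_len = width // col_len
--     if col_len == 1:
--         raise Exception("ERROR: Can't simulate prime number width!")
--
--     return (row_len, col_len)
-- ===== SOURCE B (Python) =====
-- import math
--
-- def factor_width(width):
--     bound = math.floor(math.sqrt(width))
--     col_len = 0
--     for i in range(1, bound + 1):
--         if width % i == 0:
--             col_len = i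
--     row_len = width // col_len
--     if col_len == 1:
--         raise Exception("ERROR: Can't simulate prime number width!")
--
--     return (row_len, col_len)
-- ===== Notes on version B (the rewrite author's own statement) =====
-- stated objective: alternative
-- what changed: Replaced A's downward while-loop that decrements from floor(sqrt(width)) until it hits a divisor by a single upward for-loop over range(1, floor(sqrt(width))+1) that records the last divisor seen.
import Mathlib
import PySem

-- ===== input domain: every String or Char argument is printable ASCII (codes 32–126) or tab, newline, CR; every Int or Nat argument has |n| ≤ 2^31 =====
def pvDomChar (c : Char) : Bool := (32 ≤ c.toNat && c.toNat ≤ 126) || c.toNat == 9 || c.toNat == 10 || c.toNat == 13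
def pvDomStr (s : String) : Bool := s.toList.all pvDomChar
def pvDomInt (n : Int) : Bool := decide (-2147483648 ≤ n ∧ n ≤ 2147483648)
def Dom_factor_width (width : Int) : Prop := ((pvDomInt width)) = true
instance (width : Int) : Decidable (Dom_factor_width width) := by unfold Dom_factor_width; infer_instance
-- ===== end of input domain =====

-- B replaces A's downward early-exit scan from ⌊√width⌋ with one upward loop recording the last divisor; alternative decomposition, same cost.

-- ===== PORT A =====
-- the while loop: decrement col until (width // col) * col == width; fuel bounds the decrements
def fwLoop (width : Int) : Nat → Int → Int
  | 0, col => col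
  | fuel+1, col =>
      if (PySem.Int.floordiv width col) * col ≠ width then fwLoop width fuel (col - 1) else col

def factor_width (width : Int) : Int × Int :=
  -- math.floor(math.sqrt(width)): equals Nat.sqrt exactly for the admitted inputs (0 ≤ width ≤ 2^31, double sqrt is exact there)
  let start : Int := ((Nat.sqrt width.toNat : Nat) : Int)
  let col_len := fwLoop width start.toNat start
  let row_len := PySem.Int.floordiv width col_len
  (row_len, col_len)

-- ===== PORT B =====
def factor_width_alt (width : Int) : Int × Int :=
  let bound : Int := ((Nat.sqrt width.toNat : Nat) : Int)
  let col_len := (PySem.List.pyRange 1 (bound + 1) 1).foldl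
      (fun acc i => if PySem.Int.mod width i = 0 then i else acc) 0
  let row_len := PySem.Int.floordiv width col_len
  (row_len, col_len)

-- ===== PRECONDITION & SPEC =====
-- Pre_ = exactly where Python A returns: width ≥ 4 and composite.  Excluded (A raises): width < 0 (ValueError
-- from math.sqrt), width = 0 (ZeroDivisionError), width = 1 and primes (explicit Exception).  B raises identically there.
def Pre_factor_width (width : Int) : Prop := 4 ≤ width ∧ ¬ Nat.Prime width.toNat
instance (width : Int) : Decidable (Pre_factor_width width) := by unfold Pre_factor_width; infer_instance
def pvWitness_factor_width : Int := 12

def Spec_factor_width (width : Int) (out : Int × Int) : Prop := out = factor_width_alt width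
instance (width : Int) (out : Int × Int) : Decidable (Spec_factor_width width out) := by unfold Spec_factor_width; infer_instance

-- ===== CLAIM (what is proved, stated in full; the proofs are below) =====
def Claim_equal_factor_width : Prop := ∀ (width : Int), Dom_factor_width width → Pre_factor_width width → Spec_factor_width width (factor_width width)

-- ===== LEMMAS AND PROOFS =====

-- the greatest divisor of width among 1..n (0 if none); both loops compute it
def fwGreatest (width : Int) : Nat → Int
  | 0 => 0
  | n+1 => if PySem.Int.mod width ((n:Int)+1) = 0 then (n:Int)+1 else fwGreatest width n

theorem fwLoop_eq_greatest (width : Int) :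
    ∀ n : Nat, 1 ≤ n → fwLoop width n (n : Int) = fwGreatest width n := by
  intro n
  induction n with
  | zero => omega
  | succ n ih =>
    intro _
    simp only [fwLoop, fwGreatest, Nat.cast_succ]
    by_cases hn : n = 0
    · subst hn
      have hf : PySem.Int.floordiv width 1 = width := by
        rw [PySem.Int.floordiv_eq_ediv_of_pos (by norm_num)]; simp
      have h1 : PySem.Int.mod width 1 = 0 := by
        rw [PySem.Int.mod_eq_emod_of_pos (by norm_num)]; simp
      norm_num [hf, h1]
    · have hd := PySem.Int.floordiv_mul_add_mod width ((n:Int)+1)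
      by_cases hm : PySem.Int.mod width ((n:Int)+1) = 0
      · have heq : PySem.Int.floordiv width ((n:Int)+1) * ((n:Int)+1) = width := by omega
        rw [if_neg (by omega), if_pos hm]
      · have hne : PySem.Int.floordiv width ((n:Int)+1) * ((n:Int)+1) ≠ width := by omega
        rw [if_pos hne, if_neg hm, show ((n:Int) + 1 - 1) = (n : Int) by ring]
        exact ih (by omega)

theorem fwFold_eq_greatest (width : Int) :
    ∀ n : Nat, (PySem.List.pyRange 1 ((n:Int) + 1) 1).foldl
      (fun acc i => if PySem.Int.mod width i = 0 then i else acc) 0 = fwGreatest width n := by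
  intro n
  induction n with
  | zero => simp [PySem.List.pyRange_one_eq_nil, fwGreatest]
  | succ n ih =>
    simp only [Nat.cast_succ]
    rw [show ((n:Int) + 1 + 1 : Int) = ((n:Int) + 1) + 1 by ring,
        PySem.List.pyRange_one_succ_right (by omega),
        List.foldl_append]
    simp only [List.foldl]
    rw [ih]
    simp only [fwGreatest]

-- ===== VERDICT (by name: the statement is the Claim_ definition above) =====
theorem factor_width_spec : Claim_equal_factor_width := by
  intro width _ hpre
  obtain ⟨h4, -⟩ := hpre
  unfold Spec_factor_width factor_width factor_width_alt
  have hs1 : 1 ≤ Nat.sqrt width.toNat := by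
    have : 4 ≤ width.toNat := by omega
    have h2 : Nat.sqrt 4 ≤ Nat.sqrt width.toNat := Nat.sqrt_le_sqrt this
    simpa using h2.trans' (by norm_num)
  have hA := fwLoop_eq_greatest width (Nat.sqrt width.toNat) hs1
  have hB := fwFold_eq_greatest width (Nat.sqrt width.toNat)
  simp only [Int.toNat_natCast]
  rw [hA, hB]
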